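-- pv_equiv track=rewrite | github.com/nizza/advent_of_code_2023 | day_7.py | compute_cards_value
-- ===== SOURCE A (Python) =====
-- def compute_cards_value(hand, card_symbols_sorted):
--
--     # value of single cards
--     card_val_tuples = zip(card_symbols_sorted, range(len(card_symbols_sorted)))
--     card_val_dict = {k:v for (k,v) in card_val_tuples}
--
--     # value of hand
--     # card at the beginning have higher value
--     hand_val = 0
--     L = len(hand)
--     for i in range(L):
--         card_val = card_val_dict[hand[i]]
--         hand_val += card_val * len(card_symbols_sorted)**(L-1-i)
--
--     return hand_val
-- ===== SOURCE B (Python) =====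
-- def compute_cards_value(hand, card_symbols_sorted):
--     # Horner evaluation: one left-to-right pass, no exponentiation.
--     n = len(card_symbols_sorted)
--     card_val_dict = {s: v for v, s in enumerate(card_symbols_sorted)}
--     hand_val = 0
--     for card in hand:
--         hand_val = hand_val * n + card_val_dict[card]
--     return hand_val
-- ===== Notes on version B (the rewrite author's own statement) =====
-- stated objective: faster
-- what changed: Replaces the positional power-sum (computing len(symbols)**(L-1-i) for every card) with a single Horner pass (hand_val = hand_val*n + value), and builds the dict from enumerate.
import Mathlib
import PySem

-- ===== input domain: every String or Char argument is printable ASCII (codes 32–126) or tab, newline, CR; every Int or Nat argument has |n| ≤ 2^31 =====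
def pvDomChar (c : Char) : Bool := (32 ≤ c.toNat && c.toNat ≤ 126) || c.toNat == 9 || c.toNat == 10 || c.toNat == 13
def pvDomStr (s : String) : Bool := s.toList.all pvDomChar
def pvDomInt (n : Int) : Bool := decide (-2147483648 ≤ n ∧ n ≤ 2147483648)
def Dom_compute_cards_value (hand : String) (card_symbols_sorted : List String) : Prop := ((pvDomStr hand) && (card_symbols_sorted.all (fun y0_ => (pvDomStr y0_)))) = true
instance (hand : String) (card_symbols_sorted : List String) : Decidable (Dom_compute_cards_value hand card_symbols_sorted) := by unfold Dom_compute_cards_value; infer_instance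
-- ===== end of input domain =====

-- B replaces A's per-position power-sum with a single Horner pass (and builds the same dict from enumerate); same return value on Pre_.


-- ===== PORT A =====
-- dict comprehension over zip(card_symbols_sorted, range(len(...))), then the positional power-sum loop.
-- card_val_dict[hand[i]]: KeyError (the key absent) is excluded by Pre_; the .getD fallbacks are unreachable inside Pre_.
def compute_cards_value (hand : String) (card_symbols_sorted : List String) : Int :=
  let card_val_dict : PySem.Dict String Int :=
    (card_symbols_sorted.zip (PySem.List.pyRange 0 (PySem.List.len card_symbols_sorted) 1)).foldl
      (fun d kv => d.insert kv.1 kv.2) PySem.Dict.empty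
  let L : Int := PySem.Str.len hand
  (PySem.List.pyRange 0 L 1).foldl
    (fun hand_val i =>
      let card_val := card_val_dict.getD (String.ofList [(PySem.Str.pyGet? hand i).getD ' ']) 0
      hand_val + card_val * (PySem.List.len card_symbols_sorted) ^ ((L - 1 - i).toNat)) 0

-- ===== PORT B =====
-- dict from enumerate, then one Horner pass over the characters of hand.
def compute_cards_value_alt (hand : String) (card_symbols_sorted : List String) : Int :=
  let n : Int := PySem.List.len card_symbols_sorted
  let card_val_dict : PySem.Dict String Int :=
    (PySem.List.enumerate card_symbols_sorted 0).foldl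
      (fun d vs => d.insert vs.2 vs.1) PySem.Dict.empty
  hand.toList.foldl (fun hand_val c => hand_val * n + card_val_dict.getD (String.ofList [c]) 0) 0

-- ===== PRECONDITION & SPEC =====
-- Pre_ excludes exactly the inputs where Python A raises KeyError: a card of hand not among the symbols.
def Pre_compute_cards_value (hand : String) (card_symbols_sorted : List String) : Prop :=
  (hand.toList.all (fun c => (card_symbols_sorted.map String.toList).contains [c])) = true
instance (hand : String) (card_symbols_sorted : List String) : Decidable (Pre_compute_cards_value hand card_symbols_sorted) := by unfold Pre_compute_cards_value; infer_instance

def pvWitness_compute_cards_value : String × List String := ("ab", ["a", "b", "c"])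

def Spec_compute_cards_value (hand : String) (card_symbols_sorted : List String) (out : Int) : Prop := out = compute_cards_value_alt hand card_symbols_sorted
instance (hand : String) (card_symbols_sorted : List String) (out : Int) : Decidable (Spec_compute_cards_value hand card_symbols_sorted out) := by unfold Spec_compute_cards_value; infer_instance

-- ===== CLAIM (what is proved, stated in full; the proofs are below) =====
def Claim_equal_compute_cards_value : Prop := ∀ (hand : String) (card_symbols_sorted : List String), Dom_compute_cards_value hand card_symbols_sorted → Pre_compute_cards_value hand card_symbols_sorted → Spec_compute_cards_value hand card_symbols_sorted (compute_cards_value hand card_symbols_sorted)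

-- ===== LEMMAS AND PROOFS =====

-- the two dict-building loops fold the same (key, value) pairs
theorem pv_zip_eq_enum_swap (syms : List String) : ∀ s : Int,
    syms.zip (PySem.List.pyRange s (s + syms.length) 1)
      = (PySem.List.enumerate syms s).map (fun p => (p.2, p.1)) := by
  induction syms with
  | nil => intro s; simp [PySem.List.enumerate_nil]
  | cons x xs ih =>
    intro s
    simp only [List.length_cons, PySem.List.enumerate_cons]
    push_cast
    rw [PySem.List.pyRange_one_cons (by omega),
      show s + ((xs.length : Int) + 1) = s + 1 + xs.length by ring]
    simp only [List.map_cons, List.zip_cons_cons]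
    exact congrArg _ (ih (s + 1))

theorem pv_dicts_eq (syms : List String) :
    (syms.zip (PySem.List.pyRange 0 (PySem.List.len syms) 1)).foldl
        (fun d kv => d.insert kv.1 kv.2) (PySem.Dict.empty : PySem.Dict String Int)
      = (PySem.List.enumerate syms 0).foldl
        (fun d vs => d.insert vs.2 vs.1) PySem.Dict.empty := by
  have h := pv_zip_eq_enum_swap syms 0
  simp only [zero_add] at h
  simp only [PySem.List.len_eq, h, List.foldl_map]

-- positional value of a character list (head has the highest power)
def pvS (g : Char → Int) (n : Int) : List Char → Int
  | [] => 0
  | c :: t => g c * n ^ t.length + pvS g n t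

theorem pv_horner (g : Char → Int) (n : Int) (cs : List Char) : ∀ acc : Int,
    cs.foldl (fun hv c => hv * n + g c) acc = acc * n ^ cs.length + pvS g n cs := by
  induction cs with
  | nil => intro acc; simp [pvS]
  | cons c t ih =>
    intro acc
    simp only [List.foldl_cons, ih, pvS, List.length_cons]
    ring

theorem pv_powsum (g : Char → Int) (n : Int) (cs : List Char) :
    ((List.range cs.length).map
        (fun k => g (cs[(k : Nat)]?.getD ' ')
          * n ^ (((cs.length : Int) - 1 - (k : Int)).toNat))).sum
      = pvS g n cs := by
  induction cs with
  | nil => simp [pvS]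
  | cons c t ih =>
    rw [List.length_cons, List.range_succ_eq_map, List.map_cons, List.map_map]
    have hstep : ∀ k ∈ List.range t.length,
        ((fun k => g ((c :: t)[(k : Nat)]?.getD ' ')
            * n ^ ((((t.length + 1 : Nat) : Int) - 1 - (k : Int)).toNat)) ∘ Nat.succ) k
        = g (t[(k : Nat)]?.getD ' ')
          * n ^ (((t.length : Int) - 1 - (k : Int)).toNat) := by
      intro k hk
      simp only [Function.comp, Nat.succ_eq_add_one]
      have h2 : ((((t.length + 1 : Nat) : Int)) - 1 - ((k + 1 : Nat) : Int)).toNat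
          = (((t.length : Int)) - 1 - (k : Int)).toNat := by push_cast; omega
      rw [h2]
      simp
    rw [List.map_congr_left hstep]
    simp only [List.sum_cons, ih]
    simp [pvS]

theorem pv_main (hand : String) (syms : List String) :
    compute_cards_value hand syms = compute_cards_value_alt hand syms := by
  unfold compute_cards_value compute_cards_value_alt
  rw [pv_dicts_eq]
  set dd := (PySem.List.enumerate syms 0).foldl
      (fun d vs => d.insert vs.2 vs.1) (PySem.Dict.empty : PySem.Dict String Int) with hdd
  set g : Char → Int := fun c => dd.getD (String.ofList [c]) 0 with hg
  set n : Int := PySem.List.len syms with hn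
  have hA : (PySem.List.pyRange 0 (PySem.Str.len hand) 1).foldl
      (fun hand_val i =>
        hand_val + dd.getD (String.ofList [(PySem.Str.pyGet? hand i).getD ' ']) 0
          * n ^ ((PySem.Str.len hand - 1 - i).toNat)) 0
      = pvS g n hand.toList := by
    rw [PySem.List.foldl_add
      (g := fun i => dd.getD (String.ofList [(PySem.Str.pyGet? hand i).getD ' ']) 0
          * n ^ ((PySem.Str.len hand - 1 - i).toNat))]
    rw [PySem.List.pyRange_one]
    rw [List.map_map]
    have hlen : ((PySem.Str.len hand) - 0).toNat = hand.toList.length := by simp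
    rw [hlen]
    have hfun : ∀ k ∈ List.range hand.toList.length,
        ((fun i => dd.getD (String.ofList [(PySem.Str.pyGet? hand i).getD ' ']) 0
            * n ^ ((PySem.Str.len hand - 1 - i).toNat)) ∘ (fun k : Nat => (0 : Int) + k)) k
        = g (hand.toList[(k : Nat)]?.getD ' ')
          * n ^ ((((hand.toList.length : Nat) : Int) - 1 - (k : Int)).toNat) := by
      intro k hk
      simp [hg]
    rw [List.map_congr_left hfun]
    rw [pv_powsum g n hand.toList]
    ring
  have hB : hand.toList.foldl (fun hand_val c => hand_val * n + g c) 0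
      = pvS g n hand.toList := by
    rw [pv_horner]
    simp
  rw [hA]
  exact hB.symm

-- ===== VERDICT (by name: the statement is the Claim_ definition above) =====
theorem compute_cards_value_spec : Claim_equal_compute_cards_value := by
  intro hand syms _ _
  unfold Spec_compute_cards_value
  exact pv_main hand syms
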